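-- pv_equiv track=rewrite | github.com/angelwhipple/6.101-Programming-Fundamentals | baconpath.py | actors_with_bacon_number
-- ===== SOURCE A (Python) =====
-- def acted_together(transformed_data, actor_id_1, actor_id_2):
--     if actor_id_1 == actor_id_2:
--         return True
--     else:
--         # containment check for 2nd actor in 1st actor's set of costars
--         if actor_id_2 in transformed_data[0][actor_id_1]:
--             return True
--         else:
--             return False
--
-- def actors_with_bacon_number(transformed_data, n):
--     assigned, bacon = {4724}, set()
--     # base case
--     if n == 0:
--         return assigned
--     else:
--         # loop until bacon number = n
--         for i in range(1, n+1):
--             # actors w/ bacon num i = costars of actors w/ assigned bacon nums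
--             # that have not been assigned bacon num
--             bacon = { x for p in assigned for x in transformed_data[0] if acted_together(transformed_data, x, p) \
--                       and x not in assigned }
--             # update visited actors w current bacon set
--             assigned.update(bacon)
--             # break loop if no more bacon sets can be found
--             if bacon == set():
--                 break
--         return bacon
-- ===== SOURCE B (Python) =====
-- def actors_with_bacon_number(transformed_data, n):
--     # BFS by layers over a reverse-adjacency index, instead of rescanning all actors
--     # against every assigned actor each round.
--     if n == 0:
--         return {4724}
--     if n < 0:
--         return set()
--     adj = transformed_data[0]
--     # rev[p] = all actors x (in key order) whose costar set contains p
--     rev = {}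
--     for x in adj:
--         for p in dict.fromkeys(adj[x]):
--             rev[p] = rev.get(p, []) + [x]
--     assigned = {4724}
--     frontier = [4724]
--     bacon = set()
--     for i in range(1, n + 1):
--         seen = set()
--         layer = []
--         for p in frontier:
--             for x in rev.get(p, []):
--                 if x not in assigned and x not in seen:
--                     seen.add(x)
--                     layer.append(x)
--         bacon = seen
--         assigned.update(seen)
--         frontier = layer
--         if not layer:
--             break
--     return bacon
-- ===== Notes on version B (the rewrite author's own statement) =====
-- stated objective: alternative
-- what changed: Replaced A's per-layer rescan of every actor against every already-assigned actor by a breadth-first search: a reverse-adjacency index is built once and each layer expands only the current frontier through it.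
import Mathlib
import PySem

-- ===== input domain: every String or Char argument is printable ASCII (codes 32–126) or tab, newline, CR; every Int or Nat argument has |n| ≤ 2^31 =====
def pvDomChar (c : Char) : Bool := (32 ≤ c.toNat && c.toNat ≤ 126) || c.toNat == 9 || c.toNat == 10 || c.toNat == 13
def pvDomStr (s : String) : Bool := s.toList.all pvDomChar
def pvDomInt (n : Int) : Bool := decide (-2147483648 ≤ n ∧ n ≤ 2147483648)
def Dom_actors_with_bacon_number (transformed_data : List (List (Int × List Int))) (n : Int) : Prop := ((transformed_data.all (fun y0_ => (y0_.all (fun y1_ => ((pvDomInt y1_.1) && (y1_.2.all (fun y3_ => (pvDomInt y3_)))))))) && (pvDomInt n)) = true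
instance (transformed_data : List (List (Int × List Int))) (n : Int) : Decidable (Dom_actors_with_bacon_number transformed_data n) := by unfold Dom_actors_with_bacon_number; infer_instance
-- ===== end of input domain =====

-- B replaces A's per-layer scan of every actor against every assigned actor by a
-- breadth-first search over a reverse-adjacency index built once (objective: alternative).

-- ===== PORT A =====
-- transformed_data[0] as a Python dict (insertion order, later duplicate keys overwrite in place)
def pvDict (transformed_data : List (List (Int × List Int))) : PySem.Dict Int (List Int) :=
  PySem.Dict.ofList (PySem.List.pyGetD transformed_data 0 [])

def acted_together (transformed_data : List (List (Int × List Int))) (actor_id_1 actor_id_2 : Int) : Bool :=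
  if actor_id_1 = actor_id_2 then true
  else
    -- transformed_data[0][actor_id_1]: only ever called with actor_id_1 a key, so getD is exact
    if actor_id_2 ∈ (pvDict transformed_data).getD actor_id_1 [] then true else false

-- one iteration of A's for-loop; the Bool records whether the loop has broken out
def stepA (transformed_data : List (List (Int × List Int)))
    (st : PySem.Set Int × PySem.Set Int × Bool) : PySem.Set Int × PySem.Set Int × Bool :=
  match st with
  | (assigned, _, broken) =>
    if broken then st
    else
      let bacon' : PySem.Set Int := PySem.Set.ofList (assigned.flatMap (fun p =>
        (pvDict transformed_data).keys.filter (fun x =>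
          acted_together transformed_data x p && !(PySem.Set.contains assigned x))))
      let assigned' := PySem.Set.update assigned bacon'
      (assigned', bacon', PySem.Set.equal bacon' PySem.Set.empty)

def actors_with_bacon_number (transformed_data : List (List (Int × List Int))) (n : Int) : List Int :=
  let assigned : PySem.Set Int := PySem.Set.ofList [4724]
  let bacon : PySem.Set Int := PySem.Set.empty
  if n = 0 then assigned
  else
    ((PySem.List.pyRange 1 (n + 1) 1).foldl (fun st _ => stepA transformed_data st)
      (assigned, bacon, false)).2.1

-- ===== PORT B =====
-- rev[p] = all keys x (in key order) whose costar list contains p, built once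
def pvRev (transformed_data : List (List (Int × List Int))) : PySem.Dict Int (List Int) :=
  (((pvDict transformed_data).keys).flatMap (fun x =>
      (PySem.List.dedup ((pvDict transformed_data).getD x [])).map (fun p => (p, x)))).foldl
    (fun r pr => r.modify pr.1 [] (· ++ [pr.2])) PySem.Dict.empty

-- one BFS layer: expand only the current frontier through the reverse index
def stepB (transformed_data : List (List (Int × List Int)))
    (st : PySem.Set Int × List Int × PySem.Set Int × Bool) :
    PySem.Set Int × List Int × PySem.Set Int × Bool :=
  match st with
  | (assigned, frontier, _, broken) =>
    if broken then st
    else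
      let layer : PySem.Set Int := PySem.Set.ofList (frontier.flatMap (fun p =>
        ((pvRev transformed_data).getD p []).filter (fun x => !(PySem.Set.contains assigned x))))
      (PySem.Set.update assigned layer, layer, layer, layer.isEmpty)

def actors_with_bacon_number_alt (transformed_data : List (List (Int × List Int))) (n : Int) : List Int :=
  if n = 0 then PySem.Set.ofList [4724]
  else if n < 0 then PySem.Set.empty
  else
    ((PySem.List.pyRange 1 (n + 1) 1).foldl (fun st _ => stepB transformed_data st)
      (PySem.Set.ofList [4724], [4724], PySem.Set.empty, false)).2.2.1

-- ===== PRECONDITION & SPEC =====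
-- A evaluates transformed_data[0] only when the loop body runs (n ≥ 1); on an empty
-- transformed_data with n ≥ 1 it raises IndexError, excluded here.
def Pre_actors_with_bacon_number (transformed_data : List (List (Int × List Int))) (n : Int) : Prop :=
  transformed_data ≠ [] ∨ n ≤ 0
instance (transformed_data : List (List (Int × List Int))) (n : Int) : Decidable (Pre_actors_with_bacon_number transformed_data n) := by unfold Pre_actors_with_bacon_number; infer_instance

def pvWitness_actors_with_bacon_number : (List (List (Int × List Int))) × Int :=
  ([[(4724, [5]), (5, [4724, 6]), (6, [5])]], 2)

def Spec_actors_with_bacon_number (transformed_data : List (List (Int × List Int))) (n : Int) (out : List Int) : Prop := out = actors_with_bacon_number_alt transformed_data n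
instance (transformed_data : List (List (Int × List Int))) (n : Int) (out : List Int) : Decidable (Spec_actors_with_bacon_number transformed_data n out) := by unfold Spec_actors_with_bacon_number; infer_instance

-- ===== CLAIM (what is proved, stated in full; the proofs are below) =====
def Claim_equal_actors_with_bacon_number : Prop := ∀ (transformed_data : List (List (Int × List Int))) (n : Int), Dom_actors_with_bacon_number transformed_data n → Pre_actors_with_bacon_number transformed_data n → Spec_actors_with_bacon_number transformed_data n (actors_with_bacon_number transformed_data n)

-- ===== LEMMAS AND PROOFS =====

-- a Nodup list filtered for one element
lemma filter_beq_of_nodup (l : List Int) (p : Int) (h : l.Nodup) :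
    l.filter (· == p) = if p ∈ l then [p] else [] := by
  induction l with
  | nil => simp
  | cons a l ih =>
    simp only [List.nodup_cons] at h
    by_cases hap : a = p
    · subst hap
      simp [ih h.2, h.1]
    · simp [Ne.symm hap, hap, ih h.2]

-- the pair list of pvRev, filtered at p, yields exactly the keys whose costar list contains p
lemma pairs_filter (p : Int) (g : Int → List Int) (ks : List Int) :
    ((ks.flatMap (fun x => (PySem.List.dedup (g x)).map (fun q => (q, x)))).filter
        (fun pr => pr.1 == p)).map (·.2)
      = ks.filter (fun x => decide (p ∈ g x)) := by
  induction ks with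
  | nil => simp
  | cons x ks ih =>
    simp only [List.flatMap_cons, List.filter_append, List.map_append, ih, List.filter_cons]
    rw [List.filter_map]
    have hcomp : ((fun pr : Int × Int => pr.1 == p) ∘ fun q => (q, x)) = (· == p) := rfl
    rw [hcomp, filter_beq_of_nodup _ _ (PySem.List.nodup_dedup (g x))]
    by_cases hp : p ∈ g x
    · simp [hp]
    · simp [hp]

-- characterization of the reverse index
lemma rev_getD (td : List (List (Int × List Int))) (p : Int) :
    (pvRev td).getD p []
      = (pvDict td).keys.filter (fun x => decide (p ∈ (pvDict td).getD x [])) := by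
  unfold pvRev
  rw [PySem.Dict.getD_foldl_modify_append]
  simpa using pairs_filter p (fun x => (pvDict td).getD x []) (pvDict td).keys

-- the loop invariant tying A's state to B's state
def pvInv (td : List (List (Int × List Int)))
    (sA : PySem.Set Int × PySem.Set Int × Bool)
    (sB : PySem.Set Int × List Int × PySem.Set Int × Bool) : Prop :=
  sA.1 = sB.1 ∧ sA.2.1 = sB.2.2.1 ∧ sA.2.2 = sB.2.2.2 ∧ sA.1.Nodup ∧
  (∃ pre, sA.1 = pre ++ sB.2.1) ∧
  (∀ p ∈ sA.1, p ∉ sB.2.1 → ∀ x ∈ (pvDict td).keys, p ∈ (pvDict td).getD x [] → x ∈ sA.1)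

-- A's per-p contribution for an already-processed p is empty
lemma contrib_nil (td : List (List (Int × List Int))) (assigned : PySem.Set Int) (p : Int)
    (hp : p ∈ assigned)
    (hcl : ∀ x ∈ (pvDict td).keys, p ∈ (pvDict td).getD x [] → x ∈ assigned) :
    (pvDict td).keys.filter (fun x =>
      acted_together td x p && !(PySem.Set.contains assigned x)) = [] := by
  rw [List.filter_eq_nil_iff]
  intro x hx
  by_cases hmem : x ∈ assigned
  · simp [hmem]
  · unfold acted_together
    by_cases hxp : x = p
    · exact absurd (hxp ▸ hp) hmem
    · by_cases hadj : p ∈ (pvDict td).getD x []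
      · exact absurd (hcl x hx hadj) hmem
      · simp [hxp, hadj]

-- A's per-p contribution for a frontier p equals B's reverse-index contribution
lemma contrib_frontier (td : List (List (Int × List Int))) (assigned : PySem.Set Int) (p : Int)
    (hp : p ∈ assigned) :
    (pvDict td).keys.filter (fun x =>
        acted_together td x p && !(PySem.Set.contains assigned x))
      = ((pvRev td).getD p []).filter (fun x => !(PySem.Set.contains assigned x)) := by
  rw [rev_getD, List.filter_filter]
  apply List.filter_congr
  intro x _
  by_cases hmem : x ∈ assigned
  · simp [hmem]
  · have hxp : x ≠ p := fun h => hmem (h ▸ hp)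
    unfold acted_together
    by_cases hadj : p ∈ (pvDict td).getD x [] <;>
      simp [hxp, hadj, hmem]

-- one parallel step preserves the invariant
lemma pvEqualEmpty (s : PySem.Set Int) : PySem.Set.equal s PySem.Set.empty = s.isEmpty := by
  cases s with
  | nil => rfl
  | cons a l =>
    simp only [List.isEmpty_cons]
    by_contra hc
    simp only [Bool.not_eq_false] at hc
    have := (PySem.Set.equal_iff (a :: l) PySem.Set.empty).mp hc a
    simp [PySem.Set.empty] at this

lemma step_inv (td : List (List (Int × List Int)))
    (sA : PySem.Set Int × PySem.Set Int × Bool)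
    (sB : PySem.Set Int × List Int × PySem.Set Int × Bool)
    (h : pvInv td sA sB) : pvInv td (stepA td sA) (stepB td sB) := by
  obtain ⟨assigned, bacon, broken⟩ := sA
  obtain ⟨assignedB, frontier, baconB, brokenB⟩ := sB
  obtain ⟨h1, h2, h3, hnd, ⟨pre, hpre⟩, hcl⟩ := h
  simp only at h1 h2 h3 hpre hcl
  subst h1 h2 h3
  by_cases hb : broken
  · subst hb
    simp only [stepA, stepB]
    exact ⟨rfl, rfl, rfl, hnd, ⟨pre, hpre⟩, hcl⟩
  · simp only [Bool.not_eq_true] at hb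
    subst hb
    simp only [stepA, stepB, if_neg Bool.false_ne_true]
    -- the two layer lists coincide
    have hdis : pre.Disjoint frontier := List.disjoint_of_nodup_append (hpre ▸ hnd)
    have key : ∀ (f g : Int → List Int), (∀ p ∈ pre, f p = []) →
        (∀ p ∈ frontier, f p = g p) →
        assigned.flatMap f = frontier.flatMap g := by
      intro f g h1 h2
      rw [hpre, List.flatMap_append, List.flatMap_eq_nil_iff.mpr h1, List.nil_append]
      exact List.flatMap_congr h2
    have hflat : assigned.flatMap (fun p =>
          (pvDict td).keys.filter (fun x =>
            acted_together td x p && !(PySem.Set.contains assigned x)))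
        = frontier.flatMap (fun p =>
            ((pvRev td).getD p []).filter (fun x => !(PySem.Set.contains assigned x))) := by
      refine key _ _ (fun p hp => ?_) (fun p hp => ?_)
      · exact contrib_nil td assigned p (hpre ▸ List.mem_append_left _ hp)
          (fun x hx hadj => hcl p (hpre ▸ List.mem_append_left _ hp) (hdis hp) x hx hadj)
      · exact contrib_frontier td assigned p (hpre ▸ List.mem_append_right _ hp)
    set L := frontier.flatMap (fun p =>
      ((pvRev td).getD p []).filter (fun x => !(PySem.Set.contains assigned x))) with hL
    have hnew : ∀ x ∈ PySem.Set.ofList L, x ∉ assigned := by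
      intro x hx
      rw [PySem.Set.mem_ofList] at hx
      obtain ⟨p, _, hmem⟩ := List.mem_flatMap.mp hx
      have := List.of_mem_filter hmem
      simpa [PySem.Set.contains_iff] using this
    have hupd : PySem.Set.update assigned (PySem.Set.ofList L)
        = assigned ++ PySem.Set.ofList L :=
      PySem.Set.update_eq_append_of_disjoint assigned (PySem.Set.ofList L)
        (PySem.Set.nodup_ofList L) hnew
    have hofl : PySem.Set.ofList (assigned.flatMap (fun p =>
        (pvDict td).keys.filter (fun x =>
          acted_together td x p && !(PySem.Set.contains assigned x)))) = PySem.Set.ofList L := by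
      rw [hflat]
    refine ⟨?_, ?_, ?_, ?_, ⟨assigned, ?_⟩, ?_⟩
    · rw [hofl]
    · rw [hflat]
    · rw [hofl]
      exact pvEqualEmpty (PySem.Set.ofList L)
    · rw [hofl, hupd]
      refine List.Nodup.append hnd (PySem.Set.nodup_ofList L) ?_
      intro a ha hal
      exact hnew a hal ha
    · rw [hofl, hupd]
    · -- closure for the new assigned set
      intro p hpA hpF x hx hadj
      rw [hofl, hupd] at hpA ⊢
      by_cases hxA : x ∈ assigned
      · exact List.mem_append_left _ hxA
      · have hpAold : p ∈ assigned := by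
          rcases List.mem_append.mp hpA with h | h
          · exact h
          · exact absurd h hpF
        refine List.mem_append_right _ ?_
        rw [PySem.Set.mem_ofList, ← hflat, List.mem_flatMap]
        refine ⟨p, hpAold, ?_⟩
        rw [List.mem_filter]
        refine ⟨hx, ?_⟩
        unfold acted_together
        have hxp : x ≠ p := fun h => hxA (h ▸ hpAold)
        simp [hxp, hadj, hxA]

lemma fold_inv (td : List (List (Int × List Int))) (L : List Int)
    (sA : PySem.Set Int × PySem.Set Int × Bool)
    (sB : PySem.Set Int × List Int × PySem.Set Int × Bool)
    (h : pvInv td sA sB) :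
    pvInv td (L.foldl (fun st _ => stepA td st) sA) (L.foldl (fun st _ => stepB td st) sB) := by
  induction L generalizing sA sB with
  | nil => exact h
  | cons i L ih => exact ih _ _ (step_inv td sA sB h)

-- ===== VERDICT (by name: the statement is the Claim_ definition above) =====
theorem actors_with_bacon_number_spec : Claim_equal_actors_with_bacon_number := by
  intro td n _ _
  unfold Spec_actors_with_bacon_number actors_with_bacon_number actors_with_bacon_number_alt
  by_cases h0 : n = 0
  · simp [h0]
  · by_cases hneg : n < 0
    · have : PySem.List.pyRange 1 (n + 1) 1 = [] :=
        PySem.List.pyRange_one_eq_nil (by omega)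
      simp [h0, hneg, this, PySem.Set.empty]
    · simp only [h0, hneg, if_false]
      have hinv : pvInv td (PySem.Set.ofList [4724], PySem.Set.empty, false)
          (PySem.Set.ofList [4724], [4724], PySem.Set.empty, false) := by
        refine ⟨rfl, rfl, rfl, by decide, ⟨[], rfl⟩, ?_⟩
        intro p hp hpf
        exact absurd hp hpf
      have := fold_inv td (PySem.List.pyRange 1 (n + 1) 1) _ _ hinv
      exact this.2.1
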